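-- pv_equiv track=rewrite | github.com/kanatakayasu/apriori-window | paper/E-topk-adaptive-window/implementation/python/topk_dense.py | build_item_timestamps
-- ===== SOURCE A (Python) =====
-- from typing import Dict, List, Optional, Sequence, Set, Tuple
--
-- def build_item_timestamps(
--     transactions: List[List[int]],
-- ) -> Dict[int, List[int]]:
--     """
--     Build item -> sorted list of transaction indices.
--
--     Args:
--         transactions: list of transactions, each a list of item IDs.
--
--     Returns:
--         dict mapping item -> sorted list of transaction indices
--     """
--     item_ts: Dict[int, List[int]] = {}
--     for t_idx, txn in enumerate(transactions):
--         seen: Set[int] = set()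
--         for item in txn:
--             if item not in seen:
--                 seen.add(item)
--                 item_ts.setdefault(item, []).append(t_idx)
--     return item_ts
-- ===== SOURCE B (Python) =====
-- def build_item_timestamps(transactions):
--     # Two-pass gather: first the distinct items in first-appearance order,
--     # then for each item one membership scan over the transactions.
--     order = dict.fromkeys(item for txn in transactions for item in txn)
--     return {item: [t for t, txn in enumerate(transactions) if item in txn]
--             for item in order}
-- ===== Notes on version B (the rewrite author's own statement) =====
-- stated objective: alternative
-- what changed: Replaces the single scatter pass with per-transaction seen-sets and setdefault/append by a two-pass gather: collect the distinct items in first-appearance order, then build each item's index list with a membership scan over enumerate(transactions).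
import Mathlib
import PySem

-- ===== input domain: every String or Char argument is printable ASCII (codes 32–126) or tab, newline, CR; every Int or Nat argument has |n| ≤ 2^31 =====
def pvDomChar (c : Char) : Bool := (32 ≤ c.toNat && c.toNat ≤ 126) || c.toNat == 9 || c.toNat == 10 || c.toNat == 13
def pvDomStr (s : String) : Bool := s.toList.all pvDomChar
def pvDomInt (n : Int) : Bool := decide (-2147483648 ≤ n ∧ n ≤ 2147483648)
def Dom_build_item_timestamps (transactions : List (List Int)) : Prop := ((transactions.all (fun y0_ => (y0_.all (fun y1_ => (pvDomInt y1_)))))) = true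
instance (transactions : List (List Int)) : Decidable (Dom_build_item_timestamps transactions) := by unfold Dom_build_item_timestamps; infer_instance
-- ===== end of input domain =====

-- B replaces A's scatter pass (per-transaction seen-set + setdefault/append) by a
-- two-pass gather: distinct items in first-appearance order, then one membership
-- scan per item; alternative decomposition, not faster.


-- ===== PORT A =====
-- the body of A's inner loop: 'if item not in seen: seen.add(item); item_ts.setdefault(item, []).append(t)'
def pvInnerStep (t : Int) (st : PySem.Set Int × PySem.Dict Int (List Int)) (item : Int) :
    PySem.Set Int × PySem.Dict Int (List Int) :=
  if st.1.contains item then st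
  else (PySem.Set.add st.1 item, st.2.modify item [] (fun l => l ++ [t]))

def build_item_timestamps (transactions : List (List Int)) : List (Int × List Int) :=
  let d : PySem.Dict Int (List Int) :=
    (PySem.List.enumerate transactions 0).foldl
      (fun (item_ts : PySem.Dict Int (List Int)) (p : Int × List Int) =>
        (p.2.foldl (pvInnerStep p.1) (PySem.Set.empty, item_ts)).2)
      PySem.Dict.empty
  d.items

-- ===== PORT B =====
def build_item_timestamps_alt (transactions : List (List Int)) : List (Int × List Int) :=
  let order : List Int := PySem.List.dedup (transactions.flatMap (fun txn => txn))
  order.map (fun item =>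
    (item, ((PySem.List.enumerate transactions 0).filter
              (fun p => p.2.contains item)).map (fun p => p.1)))

-- ===== PRECONDITION & SPEC =====
def Spec_build_item_timestamps (transactions : List (List Int)) (out : List (Int × List Int)) : Prop := out = build_item_timestamps_alt transactions
instance (transactions : List (List Int)) (out : List (Int × List Int)) : Decidable (Spec_build_item_timestamps transactions out) := by unfold Spec_build_item_timestamps; infer_instance

-- ===== CLAIM (what is proved, stated in full; the proofs are below) =====
def Claim_equal_build_item_timestamps : Prop := ∀ (transactions : List (List Int)), Dom_build_item_timestamps transactions → Spec_build_item_timestamps transactions (build_item_timestamps transactions)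

-- ===== LEMMAS AND PROOFS =====

-- A's outer fold, named for the proofs (definitionally the fold inside build_item_timestamps)
def pvOuter (ps : List (Int × List Int)) (d : PySem.Dict Int (List Int)) :
    PySem.Dict Int (List Int) :=
  ps.foldl (fun item_ts p => (p.2.foldl (pvInnerStep p.1) (PySem.Set.empty, item_ts)).2) d

theorem pvInnerStep_pos (t : Int) (s : PySem.Set Int) (d : PySem.Dict Int (List Int))
    (x : Int) (hx : s.contains x = true) : pvInnerStep t (s, d) x = (s, d) := by
  simp only [pvInnerStep]; rw [if_pos hx]

theorem pvInnerStep_neg (t : Int) (s : PySem.Set Int) (d : PySem.Dict Int (List Int))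
    (x : Int) (hx : ¬ s.contains x = true) :
    pvInnerStep t (s, d) x = (PySem.Set.add s x, d.modify x [] (fun l => l ++ [t])) := by
  simp only [pvInnerStep]; rw [if_neg hx]

theorem pvModify_keys (d : PySem.Dict Int (List Int)) (x t : Int) :
    (d.modify x [] (fun l => l ++ [t])).keys = PySem.Set.add d.keys x := by
  simpa [PySem.Set.update] using PySem.Dict.keys_foldl_modify [x] [] (fun _ _ l => l ++ [t]) d

-- inner loop: the dict's keys gain the transaction's items (provided seen ⊆ keys)
theorem pvInner_keys (t : Int) (txn : List Int) (s : PySem.Set Int)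
    (d : PySem.Dict Int (List Int)) (h : ∀ x ∈ s, x ∈ d.keys) :
    ((txn.foldl (pvInnerStep t) (s, d)).2).keys = PySem.Set.update d.keys txn := by
  induction txn generalizing s d with
  | nil => simp [PySem.Set.update]
  | cons x xs ih =>
    rw [List.foldl_cons]
    by_cases hx : s.contains x = true
    · rw [pvInnerStep_pos t s d x hx, ih s d h]
      have hxk : x ∈ d.keys := h x (by simpa [PySem.Set.contains] using hx)
      simp [PySem.Set.update, PySem.Set.add, PySem.Set.contains, hxk]
    · rw [pvInnerStep_neg t s d x hx]
      rw [ih _ _ ?_, pvModify_keys]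
      · simp [PySem.Set.update]
      · intro y hy
        rw [pvModify_keys]
        rcases (PySem.Set.mem_add s x y).mp hy with hy' | rfl
        · exact (PySem.Set.mem_add _ _ _).mpr (Or.inl (h y hy'))
        · exact (PySem.Set.mem_add _ _ _).mpr (Or.inr rfl)

-- inner loop: each key's list gains t exactly when the transaction has an unseen occurrence of it
theorem pvInner_getD (t : Int) (txn : List Int) (s : PySem.Set Int)
    (d : PySem.Dict Int (List Int)) (k : Int) :
    ((txn.foldl (pvInnerStep t) (s, d)).2).getD k []
      = d.getD k [] ++ (if k ∈ txn ∧ ¬ s.contains k = true then [t] else []) := by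
  induction txn generalizing s d with
  | nil => simp
  | cons x xs ih =>
    rw [List.foldl_cons]
    by_cases hx : s.contains x = true
    · rw [pvInnerStep_pos t s d x hx, ih s d]
      by_cases hk : s.contains k = true
      · have hks : k ∈ s := by simpa [PySem.Set.contains] using hk
        simp [hks]
      · have hkx : k ≠ x := fun h => by rw [h] at hk; exact hk hx
        have hks : k ∉ s := by simpa [PySem.Set.contains] using hk
        simp [hks, hkx, List.mem_cons]
    · rw [pvInnerStep_neg t s d x hx, ih]
      by_cases hkx : k = x
      · subst hkx
        rw [PySem.Dict.getD_modify_self]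
        have hks : k ∉ s := by simpa [PySem.Set.contains] using hx
        simp [hks, List.mem_cons]
      · rw [PySem.Dict.getD_modify_of_ne _ _ _ hkx]
        simp [PySem.Set.mem_add, List.mem_cons, hkx]

theorem pvOuter_keys (ps : List (Int × List Int)) (d : PySem.Dict Int (List Int)) :
    (pvOuter ps d).keys = PySem.Set.update d.keys (ps.flatMap (fun p => p.2)) := by
  induction ps generalizing d with
  | nil => simp [pvOuter, PySem.Set.update]
  | cons p ps ih =>
    simp only [pvOuter, List.foldl_cons] at *
    rw [ih, pvInner_keys p.1 p.2 PySem.Set.empty d (by simp [PySem.Set.empty])]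
    simp [PySem.Set.update, List.flatMap_cons, List.foldl_append]

theorem pvOuter_getD (ps : List (Int × List Int)) (d : PySem.Dict Int (List Int)) (k : Int) :
    (pvOuter ps d).getD k []
      = d.getD k [] ++ (ps.filter (fun p => p.2.contains k)).map (fun p => p.1) := by
  induction ps generalizing d with
  | nil => simp [pvOuter]
  | cons p ps ih =>
    simp only [pvOuter, List.foldl_cons] at *
    rw [ih, pvInner_getD p.1 p.2 PySem.Set.empty d k]
    by_cases hk : k ∈ p.2
    · simp [hk, PySem.Set.empty, PySem.Set.contains]
    · simp [hk, PySem.Set.empty, PySem.Set.contains]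

-- ===== VERDICT (by name: the statement is the Claim_ definition above) =====
theorem build_item_timestamps_spec : Claim_equal_build_item_timestamps := by
  intro ts _
  unfold Spec_build_item_timestamps build_item_timestamps build_item_timestamps_alt
  show (pvOuter (PySem.List.enumerate ts 0) PySem.Dict.empty).items = _
  have hflat : (PySem.List.enumerate ts 0).flatMap (fun p => p.2) = ts.flatMap (fun txn => txn) := by
    conv_rhs => rw [← PySem.List.map_snd_enumerate ts 0]
    rw [List.flatMap_map]
  have hkeys : (pvOuter (PySem.List.enumerate ts 0) PySem.Dict.empty).keys
      = PySem.List.dedup (ts.flatMap (fun txn => txn)) := by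
    rw [pvOuter_keys, hflat, PySem.List.dedup_eq_ofList, PySem.Set.ofList_eq_foldl]
    simp [PySem.Set.update, PySem.Dict.empty]
  have hnd : (pvOuter (PySem.List.enumerate ts 0) PySem.Dict.empty).keys.Nodup := by
    rw [hkeys]; exact PySem.List.nodup_dedup _
  rw [PySem.Dict.items_eq_map_keys _ hnd [], hkeys]
  refine List.map_congr_left ?_
  intro k _
  rw [pvOuter_getD]
  simp
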